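-- pv_equiv track=rewrite | github.com/shm0214/ChineseNER | model/FLAT/utils.py | get_yangjie_bmeso
-- ===== SOURCE A (Python) =====
-- def get_yangjie_bmeso(label_list, ignore_labels=None):
--
--     def get_ner_BMESO_yj(label_list):
--
--         def reverse_style(input_string):
--             target_position = input_string.index('[')
--             input_len = len(input_string)
--             output_string = input_string[
--                 target_position:input_len] + input_string[0:target_position]
--             return output_string
--
--         list_len = len(label_list)
--         begin_label = 'b-'
--         end_label = 'e-'
--         single_label = 's-'
--         whole_tag = ''
--         index_tag = ''
--         tag_list = []
--         stand_matrix = []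
--         for i in range(0, list_len):
--             current_label = label_list[i].lower()
--             if begin_label in current_label:
--                 if index_tag != '':
--                     tag_list.append(whole_tag + ',' + str(i - 1))
--                 whole_tag = current_label.replace(begin_label, "",
--                                                   1) + '[' + str(i)
--                 index_tag = current_label.replace(begin_label, "", 1)
--
--             elif single_label in current_label:
--                 if index_tag != '':
--                     tag_list.append(whole_tag + ',' + str(i - 1))
--                 whole_tag = current_label.replace(single_label, "",
--                                                   1) + '[' + str(i)
--                 tag_list.append(whole_tag)
--                 whole_tag = ""
--                 index_tag = ""
--             elif end_label in current_label:
--                 if index_tag != '':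
--                     tag_list.append(whole_tag + ',' + str(i))
--                 whole_tag = ''
--                 index_tag = ''
--             else:
--                 continue
--         if (whole_tag != '') & (index_tag != ''):
--             tag_list.append(whole_tag)
--         tag_list_len = len(tag_list)
--
--         for i in range(0, tag_list_len):
--             if len(tag_list[i]) > 0:
--                 tag_list[i] = tag_list[i] + ']'
--                 insert_list = reverse_style(tag_list[i])
--                 stand_matrix.append(insert_list)
--         return stand_matrix
--
--     def transform_YJ_to_fastNLP(span):
--         span = span[1:]
--         span_split = span.split(']')
--         span_type = span_split[1]
--         if ',' in span_split[0]:
--             b, e = span_split[0].split(',')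
--         else:
--             b = span_split[0]
--             e = b
--
--         b = int(b)
--         e = int(e)
--
--         e += 1
--
--         return (span_type, (b, e))
--
--     yj_form = get_ner_BMESO_yj(label_list)
--     fastNLP_form = list(map(transform_YJ_to_fastNLP, yj_form))
--     return fastNLP_form
-- ===== SOURCE B (Python) =====
-- def get_yangjie_bmeso(label_list, ignore_labels=None):
--     spans = []
--     open_type = None
--     open_begin = 0
--     for i, label in enumerate(label_list):
--         cur = label.lower()
--         if 'b-' in cur:
--             if open_type is not None:
--                 spans.append((open_type, (open_begin, i)))
--             t = cur.replace('b-', '', 1)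
--             open_type = t if t != '' else None
--             open_begin = i
--         elif 's-' in cur:
--             if open_type is not None:
--                 spans.append((open_type, (open_begin, i)))
--             spans.append((cur.replace('s-', '', 1), (i, i + 1)))
--             open_type = None
--         elif 'e-' in cur:
--             if open_type is not None:
--                 spans.append((open_type, (open_begin, i + 1)))
--             open_type = None
--     if open_type is not None:
--         spans.append((open_type, (open_begin, open_begin + 1)))
--     return spans
-- ===== Notes on version B (the rewrite author's own statement) =====
-- stated objective: simpler
-- what changed: Replaces A's two-stage scheme (encode spans as 'type[b,e' strings, then rotate at '[', split on ']'/',' and re-parse the ints) by a single pass that keeps the currently open span as (type, begin) state and emits (type,(b,e)) tuples directly, with no string encoding or re-parsing.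
-- outside the precondition, e.g. on get_yangjie_bmeso(['b-a]c', 'e-a]c'], None): A returns [('a', (0, 2))], B returns [('a]c', (0, 2))]; on get_yangjie_bmeso(['b-a[c', 'e-a[c'], None): A raises ValueError, B returns [('a[c', (0, 2))]
import Mathlib
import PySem

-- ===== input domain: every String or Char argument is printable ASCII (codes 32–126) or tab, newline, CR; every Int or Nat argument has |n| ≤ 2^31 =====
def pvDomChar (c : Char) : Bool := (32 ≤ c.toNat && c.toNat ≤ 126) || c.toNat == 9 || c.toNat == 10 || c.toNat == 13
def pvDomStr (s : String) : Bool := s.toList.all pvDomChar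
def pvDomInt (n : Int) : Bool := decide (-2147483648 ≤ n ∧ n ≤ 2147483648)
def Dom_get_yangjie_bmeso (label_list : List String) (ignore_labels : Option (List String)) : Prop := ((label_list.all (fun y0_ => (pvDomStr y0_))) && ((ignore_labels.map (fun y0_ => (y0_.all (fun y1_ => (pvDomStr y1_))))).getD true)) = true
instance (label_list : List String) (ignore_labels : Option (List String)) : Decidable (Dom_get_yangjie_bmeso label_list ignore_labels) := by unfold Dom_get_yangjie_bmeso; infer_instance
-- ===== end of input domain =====

-- B replaces A's encode-spans-as-strings-then-rotate-split-reparse scheme by a single pass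
-- holding the open span as (type, begin) state and emitting (type,(b,e)) tuples directly (simpler).


-- ===== PORT A =====
-- shared helper: Python's s.replace(old, '', 1) (both A and B call exactly this);
-- hand-ported (PySem.Chars.replace has no count argument): exact for nonempty old.
def pvReplace1 (s old : List Char) : List Char :=
  if PySem.Chars.find s old < 0 then s
  else s.take (PySem.Chars.find s old).toNat ++ s.drop ((PySem.Chars.find s old).toNat + old.length)

-- reverse_style: input_string.index('[') never raises at A's call sites ('[' is always present),
-- so Python's .index is ported as Chars.find (equal when the substring occurs).
def pvRevStyle (s : List Char) : List Char :=
  PySem.Chars.slice s (some (PySem.Chars.find s ['['])) (some (s.length : Int)) ++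
    PySem.Chars.slice s (some 0) (some (PySem.Chars.find s ['[']))

-- transform_YJ_to_fastNLP; span_split[1], split(',') unpacking and int() never fail at A's
-- call sites, so the none-branches of pyGet?/ofChars? are discharged with .getD.
-- the if ',' in span_split[0] / split(',') step, as its own helper
def pvParseBE (head : List Char) : List Char × List Char :=
  if PySem.Chars.isIn [','] head then
    ((PySem.List.pyGet? (PySem.Chars.splitOn head [',']) 0).getD [],
     (PySem.List.pyGet? (PySem.Chars.splitOn head [',']) 1).getD [])
  else (head, head)

def pvTransform (span0 : List Char) : String × (Int × Int) :=
  (String.mk ((PySem.List.pyGet? (PySem.Chars.splitOn (PySem.Chars.slice span0 (some 1) none) [']']) 1).getD []),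
   ((PySem.Int.ofChars? (pvParseBE ((PySem.List.pyGet? (PySem.Chars.splitOn (PySem.Chars.slice span0 (some 1) none) [']']) 0).getD [])).1).getD 0,
    (PySem.Int.ofChars? (pvParseBE ((PySem.List.pyGet? (PySem.Chars.splitOn (PySem.Chars.slice span0 (some 1) none) [']']) 0).getD [])).2).getD 0 + 1))

-- the main loop of get_ner_BMESO_yj: state (whole_tag, index_tag, tag_list), i the enumerate index
def pvLoopA : List String → Nat → List Char × List Char × List (List Char) →
    List Char × List Char × List (List Char)
  | [], _, st => st
  | lab :: rest, i, (whole, idx, tags) =>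
    let cur := PySem.Chars.lower lab.toList
    if PySem.Chars.isIn ['b', '-'] cur then
      let tags := if idx ≠ [] then tags ++ [whole ++ ',' :: PySem.Int.toChars ((i : Int) - 1)] else tags
      pvLoopA rest (i + 1)
        (pvReplace1 cur ['b', '-'] ++ '[' :: PySem.Int.toChars (i : Int), pvReplace1 cur ['b', '-'], tags)
    else if PySem.Chars.isIn ['s', '-'] cur then
      let tags := if idx ≠ [] then tags ++ [whole ++ ',' :: PySem.Int.toChars ((i : Int) - 1)] else tags
      let whole2 := pvReplace1 cur ['s', '-'] ++ '[' :: PySem.Int.toChars (i : Int)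
      pvLoopA rest (i + 1) ([], [], tags ++ [whole2])
    else if PySem.Chars.isIn ['e', '-'] cur then
      let tags := if idx ≠ [] then tags ++ [whole ++ ',' :: PySem.Int.toChars (i : Int)] else tags
      pvLoopA rest (i + 1) ([], [], tags)
    else
      pvLoopA rest (i + 1) (whole, idx, tags)

-- trailing append, the len>0-filtered second loop (append ']' + reverse_style), and the final map
def pvFinishA : List Char × List Char × List (List Char) → List (String × (Int × Int))
  | (whole, idx, tags) =>
    ((if whole ≠ [] ∧ idx ≠ [] then tags ++ [whole] else tags).foldl
      (fun acc t => if 0 < t.length then acc ++ [pvRevStyle (t ++ [']'])] else acc) []).map pvTransform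

def get_yangjie_bmeso (label_list : List String) (ignore_labels : Option (List String)) :
    List (String × (Int × Int)) :=
  pvFinishA (pvLoopA label_list 0 ([], [], []))

-- ===== PORT B =====
-- single pass; state: open span as Option type (as chars) × begin index × emitted spans
def pvLoopB : List String → Nat → Option (List Char) × Nat × List (String × (Int × Int)) →
    Option (List Char) × Nat × List (String × (Int × Int))
  | [], _, st => st
  | lab :: rest, i, (openTy, ob, spans) =>
    let cur := PySem.Chars.lower lab.toList
    if PySem.Chars.isIn ['b', '-'] cur then
      let spans := match openTy with
        | some t => spans ++ [(String.mk t, ((ob : Int), (i : Int)))]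
        | none => spans
      let t := pvReplace1 cur ['b', '-']
      pvLoopB rest (i + 1) ((if t ≠ [] then some t else none), i, spans)
    else if PySem.Chars.isIn ['s', '-'] cur then
      let spans := match openTy with
        | some t => spans ++ [(String.mk t, ((ob : Int), (i : Int)))]
        | none => spans
      let spans := spans ++ [(String.mk (pvReplace1 cur ['s', '-']), ((i : Int), (i : Int) + 1))]
      pvLoopB rest (i + 1) (none, ob, spans)
    else if PySem.Chars.isIn ['e', '-'] cur then
      let spans := match openTy with
        | some t => spans ++ [(String.mk t, ((ob : Int), (i : Int) + 1))]
        | none => spans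
      pvLoopB rest (i + 1) (none, ob, spans)
    else
      pvLoopB rest (i + 1) (openTy, ob, spans)

def pvFinishB : Option (List Char) × Nat × List (String × (Int × Int)) → List (String × (Int × Int))
  | (some t, ob, spans) => spans ++ [(String.mk t, ((ob : Int), (ob : Int) + 1))]
  | (none, _, spans) => spans

def get_yangjie_bmeso_alt (label_list : List String) (ignore_labels : Option (List String)) :
    List (String × (Int × Int)) :=
  pvFinishB (pvLoopB label_list 0 (none, 0, []))

-- ===== PRECONDITION & SPEC =====
-- Pre_ excludes label lists in which some begin-/single-tag label (one whose lowering contains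
-- 'b-' or 's-') contains '[' or ']': on those A's encode-as-string-then-reparse round-trip either
-- raises ValueError in int() (a '[' ends up in the numeric field) or returns a type name silently
-- truncated at the first ']' — artefacts of the string encoding.
def pvLabelOK (l : String) : Bool :=
  !((PySem.Str.isIn "[" l || PySem.Str.isIn "]" l) &&
    (PySem.Str.isIn "b-" (PySem.Str.lower l) || PySem.Str.isIn "s-" (PySem.Str.lower l)))

def Pre_get_yangjie_bmeso (label_list : List String) (ignore_labels : Option (List String)) : Prop :=
  label_list.all pvLabelOK = true

instance (label_list : List String) (ignore_labels : Option (List String)) :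
    Decidable (Pre_get_yangjie_bmeso label_list ignore_labels) := by
  unfold Pre_get_yangjie_bmeso; infer_instance

def pvWitness_get_yangjie_bmeso : List String × Option (List String) :=
  (["B-PER", "E-PER", "O", "S-LOC"], none)

def Spec_get_yangjie_bmeso (label_list : List String) (ignore_labels : Option (List String))
    (out : List (String × (Int × Int))) : Prop :=
  out = get_yangjie_bmeso_alt label_list ignore_labels

instance (label_list : List String) (ignore_labels : Option (List String))
    (out : List (String × (Int × Int))) : Decidable (Spec_get_yangjie_bmeso label_list ignore_labels out) := by
  unfold Spec_get_yangjie_bmeso; infer_instance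

-- ===== CLAIM (what is proved, stated in full; the proofs are below) =====
def Claim_equal_get_yangjie_bmeso : Prop :=
  ∀ (label_list : List String) (ignore_labels : Option (List String)),
    Dom_get_yangjie_bmeso label_list ignore_labels →
    Pre_get_yangjie_bmeso label_list ignore_labels →
    Spec_get_yangjie_bmeso label_list ignore_labels (get_yangjie_bmeso label_list ignore_labels)

-- ===== LEMMAS AND PROOFS =====
def pvGo : List Char → Bool → Nat → Option Nat
  | [], afterDigit, acc => if afterDigit = true then some acc else none
  | c :: rest, afterDigit, acc =>
    if c.isDigit = true then pvGo rest true (acc * 10 + (c.toNat - '0'.toNat))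
    else
      if c = '_' ∧ afterDigit = true then
        match rest with
        | d :: _ => if d.isDigit = true then pvGo rest false acc else none
        | [] => none
      else none

def pvDigitsVal? : List Char → Option Nat
  | [] => none
  | cs => pvGo cs false 0

theorem pvCharEq (a b : Char) (h : a.toNat = b.toNat) : a = b := by
  apply Char.ext; unfold Char.toNat at h; exact UInt32.toNat_inj.mp h

theorem digit_bounds {d : Char} (hd : d.isDigit = true) : 48 ≤ d.toNat ∧ d.toNat ≤ 57 := by
  simpa [Char.isDigit, Char.le_def, UInt32.le_iff_toNat_le] using hd

theorem digit_cases (d : Char) (hd : d.isDigit = true) :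
    d = '0' ∨ d = '1' ∨ d = '2' ∨ d = '3' ∨ d = '4' ∨ d = '5' ∨ d = '6' ∨ d = '7' ∨ d = '8' ∨ d = '9' := by
  obtain ⟨h1, h2⟩ := digit_bounds hd
  have : d.toNat = 48 ∨ d.toNat = 49 ∨ d.toNat = 50 ∨ d.toNat = 51 ∨ d.toNat = 52 ∨ d.toNat = 53 ∨
      d.toNat = 54 ∨ d.toNat = 55 ∨ d.toNat = 56 ∨ d.toNat = 57 := by omega
  rcases this with h|h|h|h|h|h|h|h|h|h
  · exact Or.inl (pvCharEq _ _ h)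
  · exact Or.inr <| Or.inl (pvCharEq _ _ h)
  · exact Or.inr <| Or.inr <| Or.inl (pvCharEq _ _ h)
  · exact Or.inr <| Or.inr <| Or.inr <| Or.inl (pvCharEq _ _ h)
  · exact Or.inr <| Or.inr <| Or.inr <| Or.inr <| Or.inl (pvCharEq _ _ h)
  · exact Or.inr <| Or.inr <| Or.inr <| Or.inr <| Or.inr <| Or.inl (pvCharEq _ _ h)
  · exact Or.inr <| Or.inr <| Or.inr <| Or.inr <| Or.inr <| Or.inr <| Or.inl (pvCharEq _ _ h)
  · exact Or.inr <| Or.inr <| Or.inr <| Or.inr <| Or.inr <| Or.inr <| Or.inr <| Or.inl (pvCharEq _ _ h)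
  · exact Or.inr <| Or.inr <| Or.inr <| Or.inr <| Or.inr <| Or.inr <| Or.inr <| Or.inr <| Or.inl (pvCharEq _ _ h)
  · exact Or.inr <| Or.inr <| Or.inr <| Or.inr <| Or.inr <| Or.inr <| Or.inr <| Or.inr <| Or.inr (pvCharEq _ _ h)

theorem isIntSpace_of_digit {c : Char} (h : c.isDigit = true) : PySem.Int.isIntSpace c = false := by
  have hb := digit_bounds h
  simp only [PySem.Int.isIntSpace, Bool.or_eq_false_iff, decide_eq_false_iff_not]
  refine ⟨⟨⟨⟨⟨?_, ?_⟩, ?_⟩, ?_⟩, ?_⟩, ?_⟩ <;> (intro hh; subst hh; revert hb; decide)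

theorem trim_id (s : List Char) (h : ∀ c ∈ s, PySem.Int.isIntSpace c = false) :
    ((s.dropWhile PySem.Int.isIntSpace).reverse.dropWhile PySem.Int.isIntSpace).reverse = s := by
  have h1 : List.dropWhile PySem.Int.isIntSpace s = s :=
    List.dropWhile_eq_self_iff.mpr (fun hne => by simp [h _ (List.getElem_mem hne)])
  rw [h1]
  have h2 : List.dropWhile PySem.Int.isIntSpace s.reverse = s.reverse := by
    refine List.dropWhile_eq_self_iff.mpr (fun hne => ?_)
    have hm : s.reverse[0] ∈ s := List.mem_reverse.mp (List.getElem_mem hne)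
    have := h _ hm
    simpa using this
  rw [h2, List.reverse_reverse]

theorem core_pos (d : Char) (ds : List Char) (hd : d.isDigit = true) (h : ∀ c ∈ ds, c.isDigit = true) :
    PySem.Int.ofChars? (d :: ds)
      = Option.map (fun n : Int => n) (do let a ← pvDigitsVal? (d :: ds); pure ((a : Nat) : Int)) := by
  unfold PySem.Int.ofChars?
  rw [trim_id]
  case h =>
    intro c hc
    rcases List.mem_cons.mp hc with rfl | hc
    · exact isIntSpace_of_digit hd
    · exact isIntSpace_of_digit (h c hc)
  clear h
  rcases digit_cases d hd with rfl|rfl|rfl|rfl|rfl|rfl|rfl|rfl|rfl|rfl <;> clear hd <;>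
      (conv_lhs => whnf) <;> (conv_rhs => whnf) <;> congr 1 <;> congr 1 <;>
      (conv_lhs => whnf) <;> (conv_rhs => whnf) <;>
      (first
        | (obtain ⟨acc, hacc⟩ : ∃ a, (0 : Nat) * 10 + ('0'.toNat - '0'.toNat) = a := ⟨_, rfl⟩; rw [hacc])
        | (obtain ⟨acc, hacc⟩ : ∃ a, (0 : Nat) * 10 + ('1'.toNat - '0'.toNat) = a := ⟨_, rfl⟩; rw [hacc])
        | (obtain ⟨acc, hacc⟩ : ∃ a, (0 : Nat) * 10 + ('2'.toNat - '0'.toNat) = a := ⟨_, rfl⟩; rw [hacc])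
        | (obtain ⟨acc, hacc⟩ : ∃ a, (0 : Nat) * 10 + ('3'.toNat - '0'.toNat) = a := ⟨_, rfl⟩; rw [hacc])
        | (obtain ⟨acc, hacc⟩ : ∃ a, (0 : Nat) * 10 + ('4'.toNat - '0'.toNat) = a := ⟨_, rfl⟩; rw [hacc])
        | (obtain ⟨acc, hacc⟩ : ∃ a, (0 : Nat) * 10 + ('5'.toNat - '0'.toNat) = a := ⟨_, rfl⟩; rw [hacc])
        | (obtain ⟨acc, hacc⟩ : ∃ a, (0 : Nat) * 10 + ('6'.toNat - '0'.toNat) = a := ⟨_, rfl⟩; rw [hacc])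
        | (obtain ⟨acc, hacc⟩ : ∃ a, (0 : Nat) * 10 + ('7'.toNat - '0'.toNat) = a := ⟨_, rfl⟩; rw [hacc])
        | (obtain ⟨acc, hacc⟩ : ∃ a, (0 : Nat) * 10 + ('8'.toNat - '0'.toNat) = a := ⟨_, rfl⟩; rw [hacc])
        | (obtain ⟨acc, hacc⟩ : ∃ a, (0 : Nat) * 10 + ('9'.toNat - '0'.toNat) = a := ⟨_, rfl⟩; rw [hacc])) <;>
      clear hacc <;>
      generalize (true : Bool) = b <;>
      (induction ds generalizing b acc with
        | nil => rfl
        | cons e t IH =>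
          (conv_lhs => whnf)
          (conv_rhs => whnf)
          congr 1
          · funext hh
            beta_reduce
            congr 1
            cases t with
            | nil => rfl
            | cons d2 t2 =>
              (conv_lhs => whnf)
              (conv_rhs => whnf)
              congr 1
              funext hh3
              beta_reduce
              exact IH _ _
          · funext hh
            beta_reduce
            exact IH _ _)

theorem core_neg (d : Char) (ds : List Char) (hd : d.isDigit = true) (h : ∀ c ∈ ds, c.isDigit = true) :
    PySem.Int.ofChars? ('-' :: d :: ds)
      = Option.map (fun n : Int => -n) (do let a ← pvDigitsVal? (d :: ds); pure ((a : Nat) : Int)) := by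
  unfold PySem.Int.ofChars?
  rw [trim_id]
  case h =>
    intro c hc
    rcases List.mem_cons.mp hc with rfl | hc
    · decide
    · rcases List.mem_cons.mp hc with rfl | hc
      · exact isIntSpace_of_digit hd
      · exact isIntSpace_of_digit (h c hc)
  clear h
  (conv_lhs => whnf)
  (conv_rhs => whnf)
  congr 1
  rcases digit_cases d hd with rfl|rfl|rfl|rfl|rfl|rfl|rfl|rfl|rfl|rfl <;> clear hd <;>
      congr 1 <;>
      (conv_lhs => whnf) <;> (conv_rhs => whnf) <;>
      (first
        | (obtain ⟨acc, hacc⟩ : ∃ a, (0 : Nat) * 10 + ('0'.toNat - '0'.toNat) = a := ⟨_, rfl⟩; rw [hacc])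
        | (obtain ⟨acc, hacc⟩ : ∃ a, (0 : Nat) * 10 + ('1'.toNat - '0'.toNat) = a := ⟨_, rfl⟩; rw [hacc])
        | (obtain ⟨acc, hacc⟩ : ∃ a, (0 : Nat) * 10 + ('2'.toNat - '0'.toNat) = a := ⟨_, rfl⟩; rw [hacc])
        | (obtain ⟨acc, hacc⟩ : ∃ a, (0 : Nat) * 10 + ('3'.toNat - '0'.toNat) = a := ⟨_, rfl⟩; rw [hacc])
        | (obtain ⟨acc, hacc⟩ : ∃ a, (0 : Nat) * 10 + ('4'.toNat - '0'.toNat) = a := ⟨_, rfl⟩; rw [hacc])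
        | (obtain ⟨acc, hacc⟩ : ∃ a, (0 : Nat) * 10 + ('5'.toNat - '0'.toNat) = a := ⟨_, rfl⟩; rw [hacc])
        | (obtain ⟨acc, hacc⟩ : ∃ a, (0 : Nat) * 10 + ('6'.toNat - '0'.toNat) = a := ⟨_, rfl⟩; rw [hacc])
        | (obtain ⟨acc, hacc⟩ : ∃ a, (0 : Nat) * 10 + ('7'.toNat - '0'.toNat) = a := ⟨_, rfl⟩; rw [hacc])
        | (obtain ⟨acc, hacc⟩ : ∃ a, (0 : Nat) * 10 + ('8'.toNat - '0'.toNat) = a := ⟨_, rfl⟩; rw [hacc])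
        | (obtain ⟨acc, hacc⟩ : ∃ a, (0 : Nat) * 10 + ('9'.toNat - '0'.toNat) = a := ⟨_, rfl⟩; rw [hacc])) <;>
      clear hacc <;>
      generalize (true : Bool) = b <;>
      (induction ds generalizing b acc with
        | nil => rfl
        | cons e t IH =>
          (conv_lhs => whnf)
          (conv_rhs => whnf)
          congr 1
          · funext hh
            beta_reduce
            congr 1
            cases t with
            | nil => rfl
            | cons d2 t2 =>
              (conv_lhs => whnf)
              (conv_rhs => whnf)
              congr 1
              funext hh3
              beta_reduce
              exact IH _ _
          · funext hh
            beta_reduce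
            exact IH _ _)

theorem digitChar_val (k : Nat) (h : k < 10) : (Nat.digitChar k).toNat - '0'.toNat = k := by
  interval_cases k <;> decide

theorem pvGo_cons_digit (c : Char) (rest : List Char) (b : Bool) (acc : Nat) (hc : c.isDigit = true) :
    pvGo (c :: rest) b acc = pvGo rest true (acc * 10 + (c.toNat - '0'.toNat)) := by
  rcases digit_cases c hc with rfl|rfl|rfl|rfl|rfl|rfl|rfl|rfl|rfl|rfl <;> rfl

theorem pvGo_digits (ds : List Char) : ∀ acc, (∀ c ∈ ds, c.isDigit = true) →
    pvGo ds true acc = some (ds.foldl (fun a c => a * 10 + (c.toNat - '0'.toNat)) acc) := by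
  induction ds with
  | nil => intro acc _; rfl
  | cons c t IH =>
    intro acc h
    show pvGo (c :: t) true acc = _
    rw [pvGo_cons_digit c t true acc (h c List.mem_cons_self)]
    rw [IH _ (fun x hx => h x (List.mem_cons_of_mem _ hx))]
    rfl

theorem pvDV_digits (d : Char) (ds : List Char) (hd : d.isDigit = true)
    (h : ∀ c ∈ ds, c.isDigit = true) :
    pvDigitsVal? (d :: ds)
      = some ((d :: ds).foldl (fun a c => a * 10 + (c.toNat - '0'.toNat)) 0) := by
  show pvGo (d :: ds) false 0 = _
  rw [pvGo_cons_digit d ds false 0 hd, pvGo_digits _ _ h]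
  rfl

theorem toDigits_foldl (n : Nat) : ∀ acc : Nat,
    (Nat.toDigits 10 n).foldl (fun a c => a * 10 + (c.toNat - '0'.toNat)) acc
      = acc * 10 ^ (Nat.toDigits 10 n).length + n := by
  induction n using Nat.strong_induction_on with
  | _ n IH =>
    intro acc
    rw [Nat.toDigits_eq_if (by norm_num)]
    by_cases h : n < 10
    · rw [if_pos h]
      simp only [List.foldl_cons, List.foldl_nil, List.length_cons, List.length_nil, pow_one]
      have := digitChar_val n h
      omega
    · rw [if_neg h]
      rw [List.foldl_append, IH (n / 10) (by omega) acc]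
      simp only [List.foldl_cons, List.foldl_nil, List.length_append, List.length_cons,
        List.length_nil]
      rw [digitChar_val (n % 10) (by omega)]
      have hlen : (Nat.toDigits 10 (n / 10)).length + (0 + 1) = (Nat.toDigits 10 (n / 10)).length + 1 := by omega
      rw [hlen, pow_succ]
      have : n / 10 * 10 + n % 10 = n := by omega
      ring_nf
      omega

theorem toDigits_ne_nil (n : Nat) : Nat.toDigits 10 n ≠ [] := by
  have := @Nat.length_toDigits_pos 10 n
  intro h; rw [h] at this; simp at this

theorem pv_roundtrip (z : Int) : PySem.Int.ofChars? (PySem.Int.toChars z) = some z := by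
  unfold PySem.Int.toChars
  by_cases hz : z < 0
  · rw [if_pos hz]
    obtain ⟨d, ds, hds⟩ : ∃ d ds, Nat.toDigits 10 z.natAbs = d :: ds := by
      cases h : Nat.toDigits 10 z.natAbs with
      | nil => exact absurd h (toDigits_ne_nil _)
      | cons a b => exact ⟨a, b, rfl⟩
    rw [hds]
    have hd : d.isDigit = true :=
      Nat.isDigit_of_mem_toDigits (by norm_num) (by norm_num) (hds ▸ List.mem_cons_self)
    have hall : ∀ c ∈ ds, c.isDigit = true := fun c hc =>
      Nat.isDigit_of_mem_toDigits (by norm_num) (by norm_num) (hds ▸ List.mem_cons_of_mem _ hc)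
    rw [core_neg d ds hd hall, pvDV_digits d ds hd hall, ← hds, toDigits_foldl]
    simp [abs_of_neg hz]
  · rw [if_neg hz]
    obtain ⟨d, ds, hds⟩ : ∃ d ds, Nat.toDigits 10 z.toNat = d :: ds := by
      cases h : Nat.toDigits 10 z.toNat with
      | nil => exact absurd h (toDigits_ne_nil _)
      | cons a b => exact ⟨a, b, rfl⟩
    rw [hds]
    have hd : d.isDigit = true :=
      Nat.isDigit_of_mem_toDigits (by norm_num) (by norm_num) (hds ▸ List.mem_cons_self)
    have hall : ∀ c ∈ ds, c.isDigit = true := fun c hc =>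
      Nat.isDigit_of_mem_toDigits (by norm_num) (by norm_num) (hds ▸ List.mem_cons_of_mem _ hc)
    rw [core_pos d ds hd hall, pvDV_digits d ds hd hall, ← hds, toDigits_foldl]
    simp
    omega

def pvSplit1 (c : Char) : List Char → List Char → List (List Char)
  | pre, [] => [pre]
  | pre, x :: t => if x = c then pre :: pvSplit1 c [] t else pvSplit1 c (pre ++ [x]) t

theorem splitOn_go_eq (c : Char) (fuel : Nat) :
    ∀ (l cur : List Char) (acc : List (List Char)), l.length < fuel →
      PySem.Chars.splitOn.go [c] fuel l cur acc = acc.reverse ++ pvSplit1 c cur.reverse l := by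
  induction fuel with
  | zero => intro l cur acc h; omega
  | succ fuel IH =>
    intro l cur acc h
    cases l with
    | nil =>
      rw [PySem.Chars.splitOn.go]
      all_goals first
        | simp [pvSplit1]
        | omega
    | cons x t =>
      rw [PySem.Chars.splitOn.go]
      by_cases hx : x = c
      · subst hx
        have hpre : List.isPrefixOf [x] (x :: t) = true := by simp [List.isPrefixOf]
        rw [if_pos hpre]
        simp only [List.length_cons] at h
        rw [IH _ _ _ (by simpa using Nat.lt_of_succ_lt_succ h)]
        simp [pvSplit1]
      · have hpre : List.isPrefixOf [c] (x :: t) = false := by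
          simp [List.isPrefixOf]; intro hh; exact absurd hh.symm hx
        rw [if_neg (by simp [hpre])]
        simp only [List.length_cons] at h
        rw [IH _ _ _ (by omega)]
        simp [pvSplit1, hx]

theorem splitOn_single (c : Char) (s : List Char) :
    PySem.Chars.splitOn s [c] = pvSplit1 c [] s := by
  unfold PySem.Chars.splitOn
  rw [splitOn_go_eq c (s.length + 1) s [] [] (by omega)]
  rfl

theorem pvSplit1_no_sep (c : Char) (pre xs : List Char) (h : c ∉ xs) :
    pvSplit1 c pre xs = [pre ++ xs] := by
  induction xs generalizing pre with
  | nil => simp [pvSplit1]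
  | cons x t IH =>
    rw [pvSplit1, if_neg (by rintro rfl; exact h List.mem_cons_self)]
    rw [IH _ (fun hm => h (List.mem_cons_of_mem _ hm))]
    simp

theorem pvSplit1_mid (c : Char) (pre xs ys : List Char) (h : c ∉ xs) :
    pvSplit1 c pre (xs ++ c :: ys) = (pre ++ xs) :: pvSplit1 c [] ys := by
  induction xs generalizing pre with
  | nil => simp [pvSplit1]
  | cons x t IH =>
    rw [List.cons_append, pvSplit1, if_neg (by rintro rfl; exact h List.mem_cons_self)]
    rw [IH _ (fun hm => h (List.mem_cons_of_mem _ hm))]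
    simp

theorem find_bracket (t r : List Char) (h : '[' ∉ t) :
    PySem.Chars.find (t ++ '[' :: r) ['['] = (t.length : Int) := by
  have hinf : ['['] <:+: (t ++ '[' :: r) := by
    rw [List.singleton_infix_iff]; simp
  have hnn : 0 ≤ PySem.Chars.find (t ++ '[' :: r) ['['] :=
    (PySem.Chars.find_nonneg_iff _ _).mpr hinf
  obtain ⟨hpre, hmin⟩ := PySem.Chars.find_spec hnn
  set k := (PySem.Chars.find (t ++ '[' :: r) ['[']).toNat with hk
  have hkle : k ≤ t.length := by
    by_contra hgt
    exact hmin t.length (by omega) (by simp [List.drop_append_of_le_length])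
  have hke : k = t.length := by
    by_contra hne
    have hklt : k < t.length := by omega
    have hdrop : List.drop k (t ++ '[' :: r) = List.drop k t ++ '[' :: r :=
      List.drop_append_of_le_length (by omega)
    rw [hdrop] at hpre
    obtain ⟨l2, hl2⟩ := hpre
    cases hdt : List.drop k t with
    | nil => have := congrArg List.length hdt; simp at this; omega
    | cons a t2 =>
      rw [hdt, List.cons_append] at hl2
      have ha : a = '[' := by injection hl2 with h1 _; exact h1.symm
      subst ha
      exact h (List.drop_subset k t (by rw [hdt]; exact List.mem_cons_self))
  omega

theorem notin_toChars (x : Char) (hx : x.toNat = 91 ∨ x.toNat = 93 ∨ x.toNat = 44) (z : Int) :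
    x ∉ PySem.Int.toChars z := by
  intro hmem
  have hdig : x.isDigit = true ∨ x = '-' := by
    unfold PySem.Int.toChars at hmem
    split at hmem
    · rcases List.mem_cons.mp hmem with rfl | hm
      · right; rfl
      · exact Or.inl (Nat.isDigit_of_mem_toDigits (by decide) (by decide) hm)
    · exact Or.inl (Nat.isDigit_of_mem_toDigits (by decide) (by decide) hmem)
  rcases hdig with hd | rfl
  · have := digit_bounds hd; omega
  · simp at hx

-- the slice decomposition done by reverse_style on a well-formed tag

theorem revStyle_eq (t r : List Char) (h : '[' ∉ t) :
    pvRevStyle (t ++ '[' :: r) = '[' :: r ++ t := by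
  unfold pvRevStyle
  rw [find_bracket t r h]
  have h1 : PySem.Chars.slice (t ++ '[' :: r) (some (t.length : Int)) (some ((t ++ '[' :: r).length : Int))
      = '[' :: r := by
    simp only [PySem.Chars.slice_eq_listSlice, PySem.List.slice_natCast]
    rw [List.drop_append_of_le_length (by omega)]
    simp [List.take_of_length_le]
  have h2 : PySem.Chars.slice (t ++ '[' :: r) (some (0 : Int)) (some (t.length : Int)) = t := by
    have : ((0 : Nat) : Int) = (0 : Int) := by norm_num
    rw [← this]
    simp only [PySem.Chars.slice_eq_listSlice, PySem.List.slice_natCast]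
    try simp [List.take_append_of_le_length]
  rw [h1, h2]

theorem pvF_single (t : List Char) (h1 : '[' ∉ t) (h2 : ']' ∉ t) (b : Int) :
    pvTransform (pvRevStyle ((t ++ '[' :: PySem.Int.toChars b) ++ [']'])) = (String.mk t, (b, b + 1)) := by
  have hsh : (t ++ '[' :: PySem.Int.toChars b) ++ [']'] = t ++ '[' :: (PySem.Int.toChars b ++ [']']) := by
    simp
  rw [hsh, revStyle_eq t _ h1]
  unfold pvTransform
  have hspan : PySem.Chars.slice ('[' :: (PySem.Int.toChars b ++ [']']) ++ t) (some 1) none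
      = PySem.Int.toChars b ++ ']' :: t := by
    simp only [PySem.Chars.slice_eq_listSlice]
    rw [PySem.List.slice_from _ (by decide)]
    simp
  rw [hspan]
  have hsplit : PySem.Chars.splitOn (PySem.Int.toChars b ++ ']' :: t) [']']
      = [PySem.Int.toChars b, t] := by
    rw [splitOn_single, pvSplit1_mid _ _ _ _ (notin_toChars ']' (by decide) b),
      pvSplit1_no_sep _ _ _ h2]
    simp
  rw [hsplit]
  have hget1 : (PySem.List.pyGet? [PySem.Int.toChars b, t] 1).getD [] = t := by
    simp [PySem.List.pyGet?, PySem.List.pyIdx?]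
  have hget0 : (PySem.List.pyGet? [PySem.Int.toChars b, t] 0).getD [] = PySem.Int.toChars b := by
    simp [PySem.List.pyGet?, PySem.List.pyIdx?]
  rw [hget1, hget0]
  have hbe : pvParseBE (PySem.Int.toChars b) = (PySem.Int.toChars b, PySem.Int.toChars b) := by
    unfold pvParseBE
    rw [if_neg]
    simp only [Bool.not_eq_true, PySem.Chars.isIn_eq_false_iff, List.singleton_infix_iff]
    exact notin_toChars ',' (by decide) b
  rw [hbe, pv_roundtrip]
  rfl

theorem pvF_comma (t : List Char) (h1 : '[' ∉ t) (h2 : ']' ∉ t) (b e : Int) :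
    pvTransform (pvRevStyle ((t ++ '[' :: (PySem.Int.toChars b ++ ',' :: PySem.Int.toChars e)) ++ [']']))
      = (String.mk t, (b, e + 1)) := by
  have hsh : (t ++ '[' :: (PySem.Int.toChars b ++ ',' :: PySem.Int.toChars e)) ++ [']']
      = t ++ '[' :: ((PySem.Int.toChars b ++ ',' :: PySem.Int.toChars e) ++ [']']) := by
    simp
  rw [hsh, revStyle_eq t _ h1]
  unfold pvTransform
  have hspan : PySem.Chars.slice ('[' :: ((PySem.Int.toChars b ++ ',' :: PySem.Int.toChars e) ++ [']']) ++ t) (some 1) none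
      = (PySem.Int.toChars b ++ ',' :: PySem.Int.toChars e) ++ ']' :: t := by
    simp only [PySem.Chars.slice_eq_listSlice]
    rw [PySem.List.slice_from _ (by decide)]
    simp
  rw [hspan]
  have hnosep : ']' ∉ PySem.Int.toChars b ++ ',' :: PySem.Int.toChars e := by
    intro hm
    rcases List.mem_append.mp hm with hm | hm
    · exact notin_toChars ']' (by decide) b hm
    · rcases List.mem_cons.mp hm with hq | hm
      · simp at hq
      · exact notin_toChars ']' (by decide) e hm
  have hsplit : PySem.Chars.splitOn ((PySem.Int.toChars b ++ ',' :: PySem.Int.toChars e) ++ ']' :: t) [']']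
      = [PySem.Int.toChars b ++ ',' :: PySem.Int.toChars e, t] := by
    rw [splitOn_single, pvSplit1_mid _ _ _ _ hnosep, pvSplit1_no_sep _ _ _ h2]
    simp
  rw [hsplit]
  have hget1 : (PySem.List.pyGet? [PySem.Int.toChars b ++ ',' :: PySem.Int.toChars e, t] 1).getD [] = t := by
    simp [PySem.List.pyGet?, PySem.List.pyIdx?]
  have hget0 : (PySem.List.pyGet? [PySem.Int.toChars b ++ ',' :: PySem.Int.toChars e, t] 0).getD []
      = PySem.Int.toChars b ++ ',' :: PySem.Int.toChars e := by
    simp [PySem.List.pyGet?, PySem.List.pyIdx?]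
  rw [hget1, hget0]
  have hbe : pvParseBE (PySem.Int.toChars b ++ ',' :: PySem.Int.toChars e)
      = (PySem.Int.toChars b, PySem.Int.toChars e) := by
    unfold pvParseBE
    rw [if_pos]
    · rw [splitOn_single, pvSplit1_mid _ _ _ _ (notin_toChars ',' (by decide) b),
        pvSplit1_no_sep _ _ _ (notin_toChars ',' (by decide) e)]
      simp [PySem.List.pyGet?, PySem.List.pyIdx?]
    · rw [PySem.Chars.isIn_iff_infix, List.singleton_infix_iff]
      simp
  rw [hbe, pv_roundtrip, pv_roundtrip]
  rfl

-- ---- character-set preservation ----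
theorem lowerChar_bracket (y : Char) (x : Char) (hx : x = '[' ∨ x = ']')
    (h : PySem.Chars.lowerChar y = x) : y = x := by
  simp only [PySem.Chars.lowerChar, PySem.Chars.isupper] at h
  split_ifs at h with hc
  · exfalso
    simp only [Bool.and_eq_true, decide_eq_true_eq, Char.le_def] at hc
    obtain ⟨hA, hZ⟩ := hc
    rw [UInt32.le_iff_toNat_le] at hA hZ
    have h1' : 65 ≤ y.toNat := hA
    have h2' : y.toNat ≤ 90 := hZ
    have hval : (y.toNat + 32).isValidChar := by left; omega
    have ht : (Char.ofNat (y.toNat + 32)).toNat = y.toNat + 32 := by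
      rw [Char.toNat_ofNat, if_pos hval]
    rw [h] at ht
    have e1 : ('[' : Char).toNat = 91 := by decide
    have e2 : (']' : Char).toNat = 93 := by decide
    rcases hx with rfl | rfl
    · rw [e1] at ht; omega
    · rw [e2] at ht; omega
  · exact h

theorem mem_lower {x : Char} {s : List Char} (hx : x = '[' ∨ x = ']')
    (h : x ∉ s) : x ∉ PySem.Chars.lower s := by
  intro hmem
  obtain ⟨y, hy, hxy⟩ := List.mem_map.mp (by simpa [PySem.Chars.lower] using hmem)
  rw [lowerChar_bracket y x hx hxy] at hy
  exact h hy

theorem mem_replace1 {x : Char} {s old : List Char} (h : x ∉ s) : x ∉ pvReplace1 s old := by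
  unfold pvReplace1
  split
  · exact h
  · intro hm
    rcases List.mem_append.mp hm with hm | hm
    · exact h (List.take_subset _ _ hm)
    · exact h (List.drop_subset _ _ hm)

theorem labelOK_brackets {l : String} (hok : pvLabelOK l = true)
    (hb : PySem.Chars.isIn ['b', '-'] (PySem.Chars.lower l.toList) = true ∨
          PySem.Chars.isIn ['s', '-'] (PySem.Chars.lower l.toList) = true) :
    '[' ∉ PySem.Chars.lower l.toList ∧ ']' ∉ PySem.Chars.lower l.toList := by
  unfold pvLabelOK at hok
  rw [Bool.not_eq_eq_eq_not, Bool.not_true, Bool.and_eq_false_iff] at hok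
  have hB : (PySem.Str.isIn "b-" (PySem.Str.lower l) || PySem.Str.isIn "s-" (PySem.Str.lower l)) = true := by
    rcases hb with hb | hb
    · apply Bool.or_eq_true_iff.mpr; left
      rw [PySem.Str.isIn_eq]
      simpa [PySem.Str.toList_lower] using hb
    · apply Bool.or_eq_true_iff.mpr; right
      rw [PySem.Str.isIn_eq]
      simpa [PySem.Str.toList_lower] using hb
  rcases hok with hA | hB'
  · rw [Bool.or_eq_false_iff] at hA
    obtain ⟨hA1, hA2⟩ := hA
    rw [PySem.Str.isIn_eq] at hA1 hA2
    have h1 : '[' ∉ l.toList := by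
      intro hm
      rw [show ("[" : String).toList = ['['] from rfl] at hA1
      rw [PySem.Chars.isIn_eq_false_iff, List.singleton_infix_iff] at hA1
      exact hA1 hm
    have h2 : ']' ∉ l.toList := by
      intro hm
      rw [show ("]" : String).toList = [']'] from rfl] at hA2
      rw [PySem.Chars.isIn_eq_false_iff, List.singleton_infix_iff] at hA2
      exact hA2 hm
    exact ⟨mem_lower (Or.inl rfl) h1, mem_lower (Or.inr rfl) h2⟩
  · rw [hB] at hB'; exact absurd hB' (by simp)

-- ---- the A-side postprocessing, incrementally ----
def pvProcessA (tags : List (List Char)) : List (String × (Int × Int)) :=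
  (tags.foldl (fun acc t => if 0 < t.length then acc ++ [pvRevStyle (t ++ [']'])] else acc) []).map pvTransform

theorem foldl_acc_out (tags : List (List Char)) :
    ∀ acc : List (List Char),
      tags.foldl (fun acc t => if 0 < t.length then acc ++ [pvRevStyle (t ++ [']'])] else acc) acc
        = acc ++ tags.foldl (fun acc t => if 0 < t.length then acc ++ [pvRevStyle (t ++ [']'])] else acc) [] := by
  induction tags with
  | nil => intro acc; simp
  | cons x t IH =>
    intro acc
    simp only [List.foldl_cons]
    rw [IH]
    conv_rhs => rw [IH]
    split <;> simp

theorem pvProcessA_append (tags : List (List Char)) (tag : List Char) (h : tag ≠ []) :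
    pvProcessA (tags ++ [tag]) = pvProcessA tags ++ [pvTransform (pvRevStyle (tag ++ [']']))] := by
  unfold pvProcessA
  rw [List.foldl_append]
  simp only [List.foldl_cons, List.foldl_nil]
  rw [if_pos (List.length_pos_iff.mpr h), foldl_acc_out]
  simp

-- the state relation between A's loop and B's loop
def pvRel (whole idx : List Char) (tags : List (List Char))
    (openTy : Option (List Char)) (ob : Nat) (spans : List (String × (Int × Int))) : Prop :=
  pvProcessA tags = spans ∧
  ((idx = [] ∧ openTy = none) ∨
   (idx ≠ [] ∧ openTy = some idx ∧ whole = idx ++ '[' :: PySem.Int.toChars ((ob : Nat) : Int) ∧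
    '[' ∉ idx ∧ ']' ∉ idx))

theorem pv_finish_eq (whole idx : List Char) (tags : List (List Char))
    (openTy : Option (List Char)) (ob : Nat) (spans : List (String × (Int × Int)))
    (hrel : pvRel whole idx tags openTy ob spans) :
    pvFinishA (whole, idx, tags) = pvFinishB (openTy, ob, spans) := by
  obtain ⟨hproc, hcase⟩ := hrel
  rcases hcase with ⟨rfl, rfl⟩ | ⟨hne, rfl, rfl, hb1, hb2⟩
  · simp [pvFinishA, pvFinishB, ← hproc, pvProcessA]
  · simp only [pvFinishA, pvFinishB]
    rw [if_pos ⟨by simp, hne⟩]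
    show pvProcessA _ = _
    rw [pvProcessA_append _ _ (by simp [hne]), pvF_single idx hb1 hb2, hproc]

theorem pv_loop_eq (labels : List String) (hok : ∀ l ∈ labels, pvLabelOK l = true) :
    ∀ (i : Nat) (whole idx : List Char) (tags : List (List Char))
      (openTy : Option (List Char)) (ob : Nat) (spans : List (String × (Int × Int))),
      pvRel whole idx tags openTy ob spans →
      pvFinishA (pvLoopA labels i (whole, idx, tags)) = pvFinishB (pvLoopB labels i (openTy, ob, spans)) := by
  induction labels with
  | nil =>
    intro i whole idx tags openTy ob spans hrel
    exact pv_finish_eq _ _ _ _ _ _ hrel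
  | cons lab rest IH =>
    intro i whole idx tags openTy ob spans hrel
    obtain ⟨hproc, hcase⟩ := hrel
    have hokl : pvLabelOK lab = true := hok lab List.mem_cons_self
    have hokr : ∀ l ∈ rest, pvLabelOK l = true := fun l hl => hok l (List.mem_cons_of_mem _ hl)
    simp only [pvLoopA, pvLoopB]
    by_cases hb : PySem.Chars.isIn ['b', '-'] (PySem.Chars.lower lab.toList) = true
    · rw [if_pos hb, if_pos hb]
      obtain ⟨hl1, hl2⟩ := labelOK_brackets hokl (Or.inl hb)
      have ht1 : '[' ∉ pvReplace1 (PySem.Chars.lower lab.toList) ['b', '-'] := mem_replace1 hl1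
      have ht2 : ']' ∉ pvReplace1 (PySem.Chars.lower lab.toList) ['b', '-'] := mem_replace1 hl2
      rcases hcase with ⟨rfl, rfl⟩ | ⟨hne, rfl, rfl, hw1, hw2⟩
      · rw [if_neg (by simp)]
        apply IH hokr
        refine ⟨by simpa using hproc, ?_⟩
        by_cases ht : pvReplace1 (PySem.Chars.lower lab.toList) ['b', '-'] = []
        · rw [if_neg (by simp [ht])]
          exact Or.inl ⟨ht, rfl⟩
        · rw [if_pos ht]
          exact Or.inr ⟨ht, rfl, rfl, ht1, ht2⟩
      · rw [if_pos hne]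
        apply IH hokr
        constructor
        · have hsh : (idx ++ '[' :: PySem.Int.toChars ((ob : Nat) : Int)) ++ ',' :: PySem.Int.toChars ((i : Int) - 1)
              = idx ++ '[' :: (PySem.Int.toChars ((ob : Nat) : Int) ++ ',' :: PySem.Int.toChars ((i : Int) - 1)) := by
            simp
          rw [pvProcessA_append _ _ (by simp), hsh, pvF_comma idx hw1 hw2]
          simp [hproc]
        · by_cases ht : pvReplace1 (PySem.Chars.lower lab.toList) ['b', '-'] = []
          · rw [if_neg (by simp [ht])]
            exact Or.inl ⟨ht, rfl⟩
          · rw [if_pos ht]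
            exact Or.inr ⟨ht, rfl, rfl, ht1, ht2⟩
    · rw [if_neg hb, if_neg hb]
      by_cases hs : PySem.Chars.isIn ['s', '-'] (PySem.Chars.lower lab.toList) = true
      · rw [if_pos hs, if_pos hs]
        obtain ⟨hl1, hl2⟩ := labelOK_brackets hokl (Or.inr hs)
        have ht1 : '[' ∉ pvReplace1 (PySem.Chars.lower lab.toList) ['s', '-'] := mem_replace1 hl1
        have ht2 : ']' ∉ pvReplace1 (PySem.Chars.lower lab.toList) ['s', '-'] := mem_replace1 hl2
        rcases hcase with ⟨rfl, rfl⟩ | ⟨hne, rfl, rfl, hw1, hw2⟩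
        · rw [if_neg (by simp)]
          apply IH hokr
          refine ⟨?_, Or.inl ⟨rfl, rfl⟩⟩
          rw [pvProcessA_append _ _ (by simp), pvF_single _ ht1 ht2]
          simp [hproc]
        · rw [if_pos hne]
          apply IH hokr
          refine ⟨?_, Or.inl ⟨rfl, rfl⟩⟩
          have hsh : (idx ++ '[' :: PySem.Int.toChars ((ob : Nat) : Int)) ++ ',' :: PySem.Int.toChars ((i : Int) - 1)
              = idx ++ '[' :: (PySem.Int.toChars ((ob : Nat) : Int) ++ ',' :: PySem.Int.toChars ((i : Int) - 1)) := by
            simp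
          rw [pvProcessA_append _ _ (by simp), pvProcessA_append _ _ (by simp),
            hsh, pvF_comma idx hw1 hw2, pvF_single _ ht1 ht2]
          simp [hproc]
      · rw [if_neg hs, if_neg hs]
        by_cases he : PySem.Chars.isIn ['e', '-'] (PySem.Chars.lower lab.toList) = true
        · rw [if_pos he, if_pos he]
          rcases hcase with ⟨rfl, rfl⟩ | ⟨hne, rfl, rfl, hw1, hw2⟩
          · rw [if_neg (by simp)]
            exact IH hokr _ _ _ _ _ _ _ ⟨hproc, Or.inl ⟨rfl, rfl⟩⟩
          · rw [if_pos hne]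
            apply IH hokr
            refine ⟨?_, Or.inl ⟨rfl, rfl⟩⟩
            have hsh : (idx ++ '[' :: PySem.Int.toChars ((ob : Nat) : Int)) ++ ',' :: PySem.Int.toChars (i : Int)
                = idx ++ '[' :: (PySem.Int.toChars ((ob : Nat) : Int) ++ ',' :: PySem.Int.toChars (i : Int)) := by
              simp
            rw [pvProcessA_append _ _ (by simp), hsh, pvF_comma idx hw1 hw2]
            simp [hproc]
        · rw [if_neg he, if_neg he]
          rcases hcase with ⟨rfl, rfl⟩ | ⟨hne, rfl, rfl, hw1, hw2⟩
          · exact IH hokr _ _ _ _ _ _ _ ⟨hproc, Or.inl ⟨rfl, rfl⟩⟩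
          · exact IH hokr _ _ _ _ _ _ _ ⟨hproc, Or.inr ⟨hne, rfl, rfl, hw1, hw2⟩⟩

-- ===== VERDICT (by name: the statement is the Claim_ definition above) =====
theorem get_yangjie_bmeso_spec : Claim_equal_get_yangjie_bmeso := by
  intro label_list ignore_labels _hdom hpre
  unfold Spec_get_yangjie_bmeso get_yangjie_bmeso get_yangjie_bmeso_alt
  exact pv_loop_eq label_list (by simpa [Pre_get_yangjie_bmeso, List.all_eq_true] using hpre)
    0 [] [] [] none 0 [] ⟨rfl, Or.inl ⟨rfl, rfl⟩⟩
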